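-- pv_equiv track=rewrite | github.com/yezhilanshan/AnotherMe | AnotherMe/anotherme2_engine/agents/geometry_fact_compiler.py | _points_on_same_circle
-- ===== SOURCE A (Python) =====
-- from typing import Any, Dict, Iterable, List, Optional, Sequence, Tuple
--
-- def _points_on_same_circle(
--
--     points: Sequence[str],
--     circle_members: Dict[str, set[str]],
-- ) -> bool:
--     point_set = set(points)
--     for members in circle_members.values():
--         if point_set.issubset(members):
--             return True
--     return False
-- ===== SOURCE B (Python) =====
-- def _points_on_same_circle(points, circle_members):
--     # Reversed nesting: keep the member-sets of the circles that still
--     # contain every point seen so far; any survivor means some circle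
--     # contains all the points.
--     candidates = list(circle_members.values())
--     for point in points:
--         candidates = [members for members in candidates if point in members]
--     return bool(candidates)
-- ===== Notes on version B (the rewrite author's own statement) =====
-- stated objective: alternative
-- what changed: Loops over points instead of circles, maintaining the list of candidate circles that still contain every point seen so far, instead of testing set(points).issubset(members) per circle.
import Mathlib
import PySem

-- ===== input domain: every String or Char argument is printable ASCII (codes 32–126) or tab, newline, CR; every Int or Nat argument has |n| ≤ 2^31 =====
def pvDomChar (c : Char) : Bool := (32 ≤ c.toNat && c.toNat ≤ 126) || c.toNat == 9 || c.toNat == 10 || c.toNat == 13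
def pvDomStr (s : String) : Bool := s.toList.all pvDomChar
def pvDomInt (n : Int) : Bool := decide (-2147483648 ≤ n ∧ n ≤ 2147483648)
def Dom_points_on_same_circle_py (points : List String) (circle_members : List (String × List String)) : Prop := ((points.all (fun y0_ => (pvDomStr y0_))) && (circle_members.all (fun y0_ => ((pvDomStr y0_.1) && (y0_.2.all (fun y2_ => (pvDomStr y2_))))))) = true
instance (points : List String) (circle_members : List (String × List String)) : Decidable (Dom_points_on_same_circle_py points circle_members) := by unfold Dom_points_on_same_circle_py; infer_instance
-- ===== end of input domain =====

-- ===== PORT A =====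
-- B loops over points keeping the candidate circles instead of testing each circle's members; alternative decomposition, same cost.
def pvGoA (pointSet : List String) : List (String × List String) → Bool
  | [] => false
  | (_, members) :: rest =>
      if PySem.Set.issubset pointSet members then true else pvGoA pointSet rest

def points_on_same_circle_py (points : List String) (circle_members : List (String × List String)) : Bool :=
  pvGoA (PySem.Set.ofList points) circle_members

-- ===== PORT B =====
def points_on_same_circle_py_alt (points : List String) (circle_members : List (String × List String)) : Bool :=
  let candidates := circle_members.map Prod.snd
  let finalCands := points.foldl (fun cs point => cs.filter (fun members => members.contains point)) candidates
  !finalCands.isEmpty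

-- ===== PRECONDITION & SPEC =====
def Spec_points_on_same_circle_py (points : List String) (circle_members : List (String × List String)) (out : Bool) : Prop := out = points_on_same_circle_py_alt points circle_members
instance (points : List String) (circle_members : List (String × List String)) (out : Bool) : Decidable (Spec_points_on_same_circle_py points circle_members out) := by unfold Spec_points_on_same_circle_py; infer_instance

-- ===== CLAIM (what is proved, stated in full; the proofs are below) =====
def Claim_equal_points_on_same_circle_py : Prop := ∀ (points : List String) (circle_members : List (String × List String)), Dom_points_on_same_circle_py points circle_members → Spec_points_on_same_circle_py points circle_members (points_on_same_circle_py points circle_members)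

-- ===== LEMMAS AND PROOFS =====
theorem pvGoA_eq_any (pointSet : List String) (cm : List (String × List String)) :
    pvGoA pointSet cm = cm.any (fun e => PySem.Set.issubset pointSet e.2) := by
  induction cm with
  | nil => rfl
  | cons hd tl ih =>
      obtain ⟨k, members⟩ := hd
      cases h : PySem.Set.issubset pointSet members <;> simp [pvGoA, h, ih]

theorem pvFoldl_filter (ps : List String) (cs : List (List String)) :
    ps.foldl (fun cs point => cs.filter (fun members => members.contains point)) cs
      = cs.filter (fun members => ps.all (fun point => members.contains point)) := by
  induction ps generalizing cs with
  | nil => simp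
  | cons p ps ih =>
      simp only [List.foldl_cons, ih, List.filter_filter]
      congr 1
      funext members
      simp [Bool.and_comm]

theorem pvNotEmpty_filter (q : List String → Bool) (l : List (List String)) :
    (!(l.filter q).isEmpty) = l.any q := by
  induction l with
  | nil => rfl
  | cons hd tl ih =>
      by_cases h : q hd = true <;> simp [h, ih]

theorem pvIssubset_ofList (points : List String) (members : List String) :
    PySem.Set.issubset (PySem.Set.ofList points) members
      = points.all (fun point => members.contains point) := by
  rw [Bool.eq_iff_iff, PySem.Set.issubset_iff, List.all_eq_true]
  constructor
  · intro h x hx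
    simpa using h x ((PySem.Set.mem_ofList points x).mpr hx)
  · intro h x hx
    have := h x ((PySem.Set.mem_ofList points x).mp hx)
    simpa using this

-- ===== VERDICT (by name: the statement is the Claim_ definition above) =====
theorem points_on_same_circle_py_spec : Claim_equal_points_on_same_circle_py := by
  intro points cm _
  unfold Spec_points_on_same_circle_py points_on_same_circle_py points_on_same_circle_py_alt
  simp only [pvGoA_eq_any, pvFoldl_filter, pvNotEmpty_filter, pvIssubset_ofList,
    List.any_map, Function.comp_def]
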